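-- pv_equiv track=rewrite | github.com/annamnatsakanyan/HTI-1-Practical-Group-1-Anna-Mnatsakanyan | Homework_7/utils.py | numbers_gen
-- ===== SOURCE A (Python) =====
-- def numbers_gen(start, stop):
--     all_odd = True
--
--     for a in range(start, stop):
--         for b in str(a):
--             if int(b) % 2 == 0:
--                 all_odd = False
--         if all_odd:
--             yield a
--         all_odd = True
-- ===== SOURCE B (Python) =====
-- def numbers_gen(start, stop):
--     # Enumerate all-odd-digit numbers directly, level by (digit-)level, ascending.
--     level = [d for d in (1, 3, 5, 7, 9) if d < stop]
--     while level:
--         for n in level: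
--             if n >= start:
--                 yield n
--         level = [10 * n + d for n in level for d in (1, 3, 5, 7, 9) if 10 * n + d < stop]
-- ===== Notes on version B (the rewrite author's own statement) =====
-- stated objective: faster
-- what changed: Instead of scanning every integer in range(start, stop) and testing each digit, B generates exactly the all-odd-digit numbers digit-level by digit-level (appending odd digits to shorter all-odd numbers), pruned by stop, in ascending order.
import Mathlib
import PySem

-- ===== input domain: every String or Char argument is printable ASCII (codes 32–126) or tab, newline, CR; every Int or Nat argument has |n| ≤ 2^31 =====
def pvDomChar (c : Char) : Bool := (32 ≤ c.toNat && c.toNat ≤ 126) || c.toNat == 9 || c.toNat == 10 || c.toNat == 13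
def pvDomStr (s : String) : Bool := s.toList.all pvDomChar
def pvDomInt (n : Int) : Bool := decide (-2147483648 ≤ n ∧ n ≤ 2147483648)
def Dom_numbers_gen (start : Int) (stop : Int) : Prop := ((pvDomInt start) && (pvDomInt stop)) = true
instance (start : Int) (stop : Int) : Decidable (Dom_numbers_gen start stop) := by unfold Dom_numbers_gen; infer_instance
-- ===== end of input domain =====

-- B enumerates the all-odd-digit numbers directly (digit level by digit level) instead of
-- scanning the whole range and testing every integer's digits; equivalence is on the list of
-- yielded values.

-- ===== PORT A =====
-- `int(b)` on a digit char is `PySem.Int.ofChars? [b]`; the `.getD 0` only fires on the '-' of a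
-- negative number, where Python's int('-') raises ValueError — those inputs are outside Pre_.
def numbers_gen (start : Int) (stop : Int) : List Int :=
  (PySem.List.pyRange start stop 1).foldl
    (fun out a =>
      let all_odd :=
        (PySem.Int.toChars a).foldl
          (fun ao b =>
            if PySem.Int.mod ((PySem.Int.ofChars? [b]).getD 0) 2 == 0 then false else ao)
          true
      if all_odd then out ++ [a] else out)
    []

-- ===== PORT B =====
-- the while-loop of Source B; the fuel `stop.toNat + 1` only makes the recursion total: the loop
-- stops by itself once the pruned level list is empty.
def pvAltLoop (start : Int) (stop : Int) : Nat → List Int → List Int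
  | 0, _ => []
  | fuel + 1, level =>
    if level.isEmpty then []
    else
      (level.filter (fun n => start ≤ n)) ++
        pvAltLoop start stop fuel
          (level.flatMap (fun n =>
            ([1, 3, 5, 7, 9].map (fun d => 10 * n + d)).filter (fun m => m < stop)))

def numbers_gen_alt (start : Int) (stop : Int) : List Int :=
  pvAltLoop start stop (stop.toNat + 1) ([1, 3, 5, 7, 9].filter (fun d => d < stop))

-- ===== PRECONDITION & SPEC =====
-- Pre_ excludes exactly the inputs on which A raises: a non-empty range starting below 0 makes
-- A call int('-') on the sign of str(a), a ValueError.
def Pre_numbers_gen (start : Int) (stop : Int) : Prop := 0 ≤ start ∨ stop ≤ start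
instance (start : Int) (stop : Int) : Decidable (Pre_numbers_gen start stop) := by
  unfold Pre_numbers_gen; infer_instance

def pvWitness_numbers_gen : Int × Int := (3, 40)

def Spec_numbers_gen (start : Int) (stop : Int) (out : List Int) : Prop :=
  out = numbers_gen_alt start stop
instance (start : Int) (stop : Int) (out : List Int) : Decidable (Spec_numbers_gen start stop out) := by
  unfold Spec_numbers_gen; infer_instance

-- ===== CLAIM (what is proved, stated in full; the proofs are below) =====
def Claim_equal_numbers_gen : Prop := ∀ (start : Int) (stop : Int), Dom_numbers_gen start stop → Pre_numbers_gen start stop → Spec_numbers_gen start stop (numbers_gen start stop)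

-- ===== LEMMAS AND PROOFS =====

-- all decimal digits of n are odd (n = 0 has digit '0', which is even)
def pvOddDigits (n : Nat) : Bool :=
  if _h : n < 10 then n % 2 == 1 else (n % 2 == 1) && pvOddDigits (n / 10)
  decreasing_by exact Nat.div_lt_self (by omega) (by omega)

-- the all-odd-digit numbers with exactly k+1 digits, ascending
def pvOddList : Nat → List Int
  | 0 => [1, 3, 5, 7, 9]
  | k + 1 => (pvOddList k).flatMap (fun n => [1, 3, 5, 7, 9].map (fun d => 10 * n + d))

-- the (k+1)-digit repunit 11…1, the least element of pvOddList k
def pvRep : Nat → Int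
  | 0 => 1
  | k + 1 => 10 * pvRep k + 1

lemma pvOddDigits_lt (n : Nat) (h : n < 10) : pvOddDigits n = (n % 2 == 1) := by
  rw [pvOddDigits, dif_pos h]

lemma pvOddDigits_ge (n : Nat) (h : ¬ n < 10) : pvOddDigits n = ((n % 2 == 1) && pvOddDigits (n / 10)) := by
  rw [pvOddDigits, dif_neg h]

def pvCharOdd (c : Char) : Bool :=
  !(PySem.Int.mod ((PySem.Int.ofChars? [c]).getD 0) 2 == 0)

lemma pvFoldAll (cs : List Char) (acc : Bool) :
    cs.foldl (fun ao b =>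
      if PySem.Int.mod ((PySem.Int.ofChars? [b]).getD 0) 2 == 0 then false else ao) acc
      = (acc && cs.all pvCharOdd) := by
  induction cs generalizing acc with
  | nil => simp
  | cons c cs ih =>
    simp only [List.foldl_cons, List.all_cons, ih, pvCharOdd]
    cases h : PySem.Int.mod ((PySem.Int.ofChars? [c]).getD 0) 2 == 0 <;> simp

lemma pvCharOdd_digitChar (m : Nat) (h : m < 10) :
    pvCharOdd (Nat.digitChar m) = (m % 2 == 1) := by
  interval_cases m <;> decide

lemma pvToDigitsCore_all (fuel : Nat) : ∀ (n : Nat) (ds : List Char), n < fuel →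
    (Nat.toDigitsCore 10 fuel n ds).all pvCharOdd = (pvOddDigits n && ds.all pvCharOdd) := by
  induction fuel with
  | zero => intro n ds h; omega
  | succ fuel ih =>
    intro n ds h
    rw [Nat.toDigitsCore]
    by_cases h0 : n / 10 = 0
    · have hn : n < 10 := by omega
      simp [h0, List.all_cons, pvCharOdd_digitChar n hn, pvOddDigits_lt n hn,
        Nat.mod_eq_of_lt hn]
    · have h10 : 10 ≤ n := by omega
      have : n / 10 < fuel := by
        have := Nat.div_lt_self (show 0 < n by omega) (show 1 < 10 by omega)
        omega
      rw [if_neg h0]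
      rw [ih (n / 10) _ this]
      rw [pvOddDigits_ge n (by omega)]
      have hmm : n % 10 % 2 = n % 2 := by omega
      simp only [List.all_cons, pvCharOdd_digitChar (n % 10) (by omega), hmm, Bool.and_assoc]
      cases n % 2 == 1 <;> cases pvOddDigits (n / 10) <;> simp

-- the inner for-loop of A computes the all-digits-odd predicate, for a ≥ 0
lemma pvInner_eq (a : Int) (ha : 0 ≤ a) :
    (PySem.Int.toChars a).foldl
      (fun ao b =>
        if PySem.Int.mod ((PySem.Int.ofChars? [b]).getD 0) 2 == 0 then false else ao) true
      = pvOddDigits a.toNat := by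
  rw [pvFoldAll]
  have : PySem.Int.toChars a = Nat.toDigits 10 a.toNat := by
    simp [PySem.Int.toChars, not_lt.mpr ha]
  rw [this, Nat.toDigits, pvToDigitsCore_all (a.toNat + 1) a.toNat [] (by omega)]
  simp

lemma pvA_eq_filter (start stop : Int) (h : 0 ≤ start ∨ stop ≤ start) :
    numbers_gen start stop
      = (PySem.List.pyRange start stop 1).filter (fun a => pvOddDigits a.toNat) := by
  unfold numbers_gen
  rw [PySem.List.foldl_append_if_eq_filter
    (fun a => (PySem.Int.toChars a).foldl
      (fun ao b =>
        if PySem.Int.mod ((PySem.Int.ofChars? [b]).getD 0) 2 == 0 then false else ao) true)]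
  rw [List.nil_append]
  apply List.filter_congr
  intro a hmem
  rcases h with h | h
  · exact pvInner_eq a (le_trans h (PySem.List.mem_pyRange_one.mp hmem).1)
  · rw [PySem.List.pyRange_one_eq_nil h] at hmem; cases hmem

lemma pvMem_oddList : ∀ (k : Nat) (a : Int),
    a ∈ pvOddList k ↔ ((10 : Int) ^ k ≤ a ∧ a < 10 ^ (k + 1) ∧ pvOddDigits a.toNat = true) := by
  intro k
  induction k with
  | zero =>
    intro a
    constructor
    · intro h
      fin_cases h <;>
        exact ⟨by norm_num, by norm_num, by rw [pvOddDigits_lt _ (by decide)]; decide⟩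
    · rintro ⟨h1, h2, h3⟩
      norm_num at h1 h2
      interval_cases a <;>
        first
          | decide
          | exact absurd h3 (by rw [pvOddDigits_lt _ (by decide)]; decide)
  | succ k ih =>
    intro a
    constructor
    · intro h
      simp only [pvOddList, List.mem_flatMap, List.mem_map, List.mem_cons] at h
      obtain ⟨n, hn, d, hd, rfl⟩ := h
      obtain ⟨hn1, hn2, hn3⟩ := ih n |>.mp hn
      have hp : (1 : Int) ≤ 10 ^ k := one_le_pow₀ (by norm_num)
      simp only [List.not_mem_nil, or_false] at hd
      have hd19 : 1 ≤ d ∧ d ≤ 9 ∧ d % 2 = 1 := by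
        rcases hd with rfl | rfl | rfl | rfl | rfl <;> norm_num
      have hn_ge : (1 : Int) ≤ n := le_trans hp hn1
      refine ⟨?_, ?_, ?_⟩
      · rw [pow_succ]; nlinarith [hd19.1]
      · rw [pow_succ (10:Int) (k+1), pow_succ (10:Int) k] at *; nlinarith [hd19.2.1]
      · have h1 : (10 * n + d).toNat = 10 * n.toNat + d.toNat := by omega
        have h10 : ¬ (10 * n + d).toNat < 10 := by omega
        rw [pvOddDigits_ge _ h10]
        have hm : (10 * n + d).toNat % 2 = 1 := by omega
        have hdv : (10 * n + d).toNat / 10 = n.toNat := by omega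
        simp [hm, hdv, hn3]
    · rintro ⟨h1, h2, h3⟩
      have hp : (1 : Int) ≤ 10 ^ k := one_le_pow₀ (by norm_num)
      have hpos : (0:Int) < a := by
        calc (0:Int) < 10 ^ (k+1) := by positivity
        _ ≤ a := h1
      have h10 : ¬ a.toNat < 10 := by
        have : (10:Int) ≤ 10 ^ (k+1) := by
          calc (10:Int) = 10 * 1 := by ring
          _ ≤ 10 ^ k * 10 := by nlinarith
          _ = 10 ^ (k+1) := by ring
        omega
      rw [pvOddDigits_ge _ h10] at h3
      simp only [Bool.and_eq_true, beq_iff_eq] at h3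
      obtain ⟨hodd, hrec⟩ := h3
      -- decompose a = 10 * (a / 10) + (a % 10)
      set n : Int := ((a.toNat / 10 : Nat) : Int) with hn_def
      set d : Int := ((a.toNat % 10 : Nat) : Int) with hd_def
      have hsplit : a = 10 * n + d := by omega
      have hd_odd : d % 2 = 1 := by omega
      have hd_lt : d < 10 := by omega
      have hd_pos : 0 ≤ d := by omega
      refine (by
        simp only [pvOddList, List.mem_flatMap, List.mem_map]
        refine ⟨n, ?_, d, ?_, hsplit.symm⟩
        · apply (ih n).mpr
          have hnat1 : (10:Int) ^ (k+1) = ((10 ^ (k+1) : Nat) : Int) := by push_cast; ring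
          have hnat2 : (10:Int) ^ (k+2) = ((10 ^ (k+2) : Nat) : Int) := by push_cast; ring
          have hb1 : (10:Nat) ^ (k+1) ≤ a.toNat := by
            rw [hnat1] at h1; omega
          have hb2 : a.toNat < 10 ^ (k+2) := by
            rw [hnat2] at h2; omega
          have hq1 : (10:Nat) ^ k ≤ a.toNat / 10 := by
            rw [Nat.le_div_iff_mul_le (by omega)]
            calc 10 ^ k * 10 = 10 ^ (k+1) := by ring
            _ ≤ a.toNat := hb1
          have hq2 : a.toNat / 10 < 10 ^ (k+1) := by
            rw [Nat.div_lt_iff_lt_mul (by omega)]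
            calc a.toNat < 10 ^ (k+2) := hb2
            _ = 10 ^ (k+1) * 10 := by ring
          refine ⟨?_, ?_, ?_⟩
          · calc (10:Int) ^ k = ((10 ^ k : Nat) : Int) := by push_cast; ring
            _ ≤ n := by omega
          · calc n < ((10 ^ (k+1) : Nat) : Int) := by omega
            _ = (10:Int) ^ (k+1) := by push_cast; ring
          · have : n.toNat = a.toNat / 10 := by omega
            rw [this]; exact hrec
        · simp only [List.mem_cons, List.not_mem_nil]
          omega)

lemma pvOddList_pos (k : Nat) (a : Int) (h : a ∈ pvOddList k) : 1 ≤ a := by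
  have := (pvMem_oddList k a).mp h
  have hp : (1 : Int) ≤ 10 ^ k := one_le_pow₀ (by norm_num)
  omega

lemma pvRep_mem (k : Nat) : pvRep k ∈ pvOddList k := by
  induction k with
  | zero => simp [pvRep, pvOddList]
  | succ k ih =>
    simp only [pvOddList, List.mem_flatMap, List.mem_map, pvRep]
    exact ⟨pvRep k, ih, 1, by simp, rfl⟩

lemma pvRep_le (k : Nat) (a : Int) (h : a ∈ pvOddList k) : pvRep k ≤ a := by
  induction k generalizing a with
  | zero => fin_cases h <;> norm_num [pvRep]
  | succ k ih =>
    simp only [pvOddList, List.mem_flatMap, List.mem_map] at h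
    obtain ⟨n, hn, d, hd, rfl⟩ := h
    have h1 := ih n hn
    have hd1 : 1 ≤ d := by
      simp only [List.mem_cons, List.not_mem_nil, or_false] at hd
      rcases hd with rfl | rfl | rfl | rfl | rfl <;> norm_num
    simp only [pvRep]
    omega

lemma pvRep_pos (k : Nat) : 1 ≤ pvRep k := pvOddList_pos k (pvRep k) (pvRep_mem k)

lemma pvRep_mono {k j : Nat} (h : k ≤ j) : pvRep k ≤ pvRep j := by
  induction h with
  | refl => exact le_refl _
  | step _ ih => rename_i m _; have := pvRep_pos m; simp only [pvRep]; omega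

-- one while-loop step: pruned blocks over a pruned level = the next pruned level
lemma pvStep_eq (stop : Int) : ∀ (l : List Int), (∀ n ∈ l, 1 ≤ n) →
    (l.filter (fun n => n < stop)).flatMap (fun n =>
        ([1, 3, 5, 7, 9].map (fun d => 10 * n + d)).filter (fun m => m < stop))
      = (l.flatMap (fun n => [1, 3, 5, 7, 9].map (fun d => 10 * n + d))).filter
          (fun m => m < stop) := by
  intro l hl
  induction l with
  | nil => simp
  | cons a l ih =>
    have ha : 1 ≤ a := hl a (by simp)
    have ihl := ih (fun n hn => hl n (by simp [hn]))
    by_cases h : a < stop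
    · rw [List.filter_cons_of_pos (by simpa using h), List.flatMap_cons, List.flatMap_cons,
        List.filter_append, ihl]
    · have hblk : ([1, 3, 5, 7, 9].map (fun d => 10 * a + d)).filter
          (fun m => decide (m < stop)) = [] := by
        have hb1 : ¬ (10 * a + 1 < stop) := by omega
        have hb3 : ¬ (10 * a + 3 < stop) := by omega
        have hb5 : ¬ (10 * a + 5 < stop) := by omega
        have hb7 : ¬ (10 * a + 7 < stop) := by omega
        have hb9 : ¬ (10 * a + 9 < stop) := by omega
        simp [hb1, hb3, hb5, hb7, hb9]
      rw [List.filter_cons_of_neg (by simpa using h), List.flatMap_cons,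
        List.filter_append, ihl, hblk, List.nil_append]

lemma pvAlt_mem (start stop : Int) : ∀ (fuel k : Nat), stop ≤ (10:Int) ^ (k + fuel) →
    ∀ a, a ∈ pvAltLoop start stop fuel ((pvOddList k).filter (fun n => n < stop))
      ↔ (start ≤ a ∧ a < stop ∧ (10:Int) ^ k ≤ a ∧ pvOddDigits a.toNat = true) := by
  intro fuel
  induction fuel with
  | zero =>
    intro k hfuel a
    simp only [pvAltLoop, List.not_mem_nil, false_iff]
    rintro ⟨_, h2, h3, _⟩
    simp only [Nat.add_zero] at hfuel
    omega
  | succ fuel ih =>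
    intro k hfuel a
    rw [pvAltLoop]
    by_cases hemp : ((pvOddList k).filter (fun n => n < stop)).isEmpty
    · simp only [hemp, if_true, List.not_mem_nil, false_iff]
      rintro ⟨h1, h2, h3, h4⟩
      -- the pruned level is empty, so stop ≤ pvRep k; but a < stop and a has ≥ k+1 digits
      have hrep : ¬ (pvRep k < stop) := by
        intro hc
        have : pvRep k ∈ (pvOddList k).filter (fun n => n < stop) := by
          rw [List.mem_filter]; exact ⟨pvRep_mem k, by simp [hc]⟩
        rw [List.isEmpty_iff] at hemp
        simp [hemp] at this
      -- a is a member of some pvOddList j with j ≥ k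
      have hpos : (0:Int) < a := by
        have hp : (1 : Int) ≤ 10 ^ k := one_le_pow₀ (by norm_num)
        omega
      have hne : a.toNat ≠ 0 := by omega
      set j := Nat.log 10 a.toNat with hj
      have hmem : a ∈ pvOddList j := by
        apply (pvMem_oddList j a).mpr
        have hb1 := Nat.pow_log_le_self 10 hne
        have hb2 := Nat.lt_pow_succ_log_self (show 1 < 10 by omega) a.toNat
        rw [← hj] at hb1 hb2
        refine ⟨?_, ?_, h4⟩
        · calc (10:Int) ^ j = ((10 ^ j : Nat) : Int) := by push_cast; ring
          _ ≤ a := by omega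
        · calc a = ((a.toNat : Nat) : Int) := by omega
          _ < ((10 ^ (j+1) : Nat) : Int) := by exact_mod_cast hb2
          _ = (10:Int) ^ (j+1) := by push_cast; ring
      have hkj : k ≤ j := by
        by_contra hc
        rw [not_le] at hc
        have : (10:Int) ^ k ≤ a := h3
        have hup : a < (10:Int) ^ (j+1) := ((pvMem_oddList j a).mp hmem).2.1
        have : (10:Int) ^ (j+1) ≤ (10:Int) ^ k :=
          pow_le_pow_right₀ (by norm_num) (by omega)
        omega
      have h5 : pvRep j ≤ a := pvRep_le j a hmem
      have h6 : pvRep k ≤ pvRep j := pvRep_mono hkj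
      have h7 : stop ≤ a := le_trans (le_trans (not_lt.mp hrep) h6) h5
      omega
    · simp only [hemp, Bool.false_eq_true, if_false, List.mem_append]
      rw [pvStep_eq stop (pvOddList k) (pvOddList_pos k)]
      have hnext : (pvOddList k).flatMap (fun n => [1, 3, 5, 7, 9].map (fun d => 10 * n + d))
          = pvOddList (k + 1) := rfl
      rw [hnext]
      rw [ih (k + 1) (by
        have : k + 1 + fuel = k + (fuel + 1) := by omega
        rw [this]; exact hfuel) a]
      constructor
      · rintro (h | h)
        · rw [List.mem_filter, List.mem_filter] at h
          obtain ⟨⟨hm, hlt⟩, hge⟩ := h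
          have := (pvMem_oddList k a).mp hm
          simp at hlt hge
          exact ⟨hge, hlt, this.1, this.2.2⟩
        · obtain ⟨h1, h2, h3, h4⟩ := h
          have : (10:Int) ^ k ≤ a :=
            le_trans (pow_le_pow_right₀ (by norm_num) (by omega)) h3
          exact ⟨h1, h2, this, h4⟩
      · rintro ⟨h1, h2, h3, h4⟩
        by_cases hsplit : a < (10:Int) ^ (k + 1)
        · left
          rw [List.mem_filter, List.mem_filter]
          refine ⟨⟨(pvMem_oddList k a).mpr ⟨h3, hsplit, h4⟩, by simp [h2]⟩, by simp [h1]⟩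
        · right
          exact ⟨h1, h2, by omega, h4⟩

lemma pvBlk_bounds (a x : Int) (h : x ∈ [1, 3, 5, 7, 9].map (fun d => 10 * a + d)) :
    10 * a + 1 ≤ x ∧ x ≤ 10 * a + 9 := by
  simp only [List.map_cons, List.map_nil, List.mem_cons, List.not_mem_nil, or_false] at h
  rcases h with rfl | rfl | rfl | rfl | rfl <;> omega

lemma pvOddList_pairwise (k : Nat) : (pvOddList k).Pairwise (· < ·) := by
  induction k with
  | zero => decide
  | succ k ih =>
    simp only [pvOddList]
    generalize hl : pvOddList k = l at ih
    have hpos : ∀ n ∈ l, 1 ≤ n := by rw [← hl]; exact pvOddList_pos k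
    clear hl
    induction l with
    | nil => simp
    | cons a l ihl =>
      rw [List.flatMap_cons]
      rw [List.pairwise_append]
      refine ⟨?_, ?_, ?_⟩
      · simp only [List.map_cons, List.map_nil]
        simp [List.pairwise_cons]
      · exact ihl (List.Pairwise.sublist (List.sublist_cons_self a l) ih)
          (fun n hn => hpos n (by simp [hn]))
      · intro x hx y hy
        obtain ⟨hx1, hx2⟩ := pvBlk_bounds a x hx
        simp only [List.mem_flatMap] at hy
        obtain ⟨b, hb, hyb⟩ := hy
        have hab : a < b := (List.pairwise_cons.mp ih).1 b hb
        obtain ⟨hy1, hy2⟩ := pvBlk_bounds b y hyb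
        omega

lemma pvAlt_pairwise (start stop : Int) : ∀ (fuel k : Nat), stop ≤ (10:Int) ^ (k + fuel) →
    (pvAltLoop start stop fuel ((pvOddList k).filter (fun n => n < stop))).Pairwise (· < ·) := by
  intro fuel
  induction fuel with
  | zero => intro k _; simp [pvAltLoop]
  | succ fuel ih =>
    intro k hfuel
    rw [pvAltLoop]
    by_cases hemp : ((pvOddList k).filter (fun n => n < stop)).isEmpty
    · simp [hemp]
    · simp only [hemp, Bool.false_eq_true, if_false]
      rw [pvStep_eq stop (pvOddList k) (pvOddList_pos k)]
      have hnext : (pvOddList k).flatMap (fun n => [1, 3, 5, 7, 9].map (fun d => 10 * n + d))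
          = pvOddList (k + 1) := rfl
      rw [hnext]
      have hfuel' : stop ≤ (10:Int) ^ (k + 1 + fuel) := by
        have : k + 1 + fuel = k + (fuel + 1) := by omega
        rw [this]; exact hfuel
      rw [List.pairwise_append]
      refine ⟨List.Pairwise.filter _ (List.Pairwise.filter _ (pvOddList_pairwise k)),
        ih (k + 1) hfuel', ?_⟩
      intro x hx y hy
      rw [List.mem_filter, List.mem_filter] at hx
      have hxk := (pvMem_oddList k x).mp hx.1.1
      have hy' := (pvAlt_mem start stop fuel (k + 1) hfuel' y).mp hy
      calc x < (10:Int) ^ (k + 1) := hxk.2.1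
        _ ≤ y := hy'.2.2.1

lemma pvFuel_ok (stop : Int) : stop ≤ (10:Int) ^ (0 + (stop.toNat + 1)) := by
  rcases le_or_gt stop 0 with h | h
  · calc stop ≤ 0 := h
    _ ≤ (10:Int) ^ (0 + (stop.toNat + 1)) := by positivity
  · have h1 : stop.toNat < 10 ^ (stop.toNat + 1) :=
      lt_of_lt_of_le (Nat.lt_pow_self (by omega)) (Nat.pow_le_pow_right (by omega) (by omega))
    refine le_of_lt ?_
    calc stop = ((stop.toNat : Nat) : Int) := by omega
    _ < ((10 ^ (stop.toNat + 1) : Nat) : Int) := by exact_mod_cast h1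
    _ = (10:Int) ^ (0 + (stop.toNat + 1)) := by push_cast; ring

lemma pvSorted_ext : ∀ (l1 l2 : List Int), l1.Pairwise (· < ·) → l2.Pairwise (· < ·) →
    (∀ a, a ∈ l1 ↔ a ∈ l2) → l1 = l2 := by
  intro l1 l2 h1 h2 hmem
  have n1 : l1.Nodup := h1.imp ne_of_lt
  have n2 : l2.Nodup := h2.imp ne_of_lt
  exact List.Perm.eq_of_pairwise
    (fun a b _ _ hab hba => absurd hab (lt_asymm hba)) h1 h2
    ((List.perm_ext_iff_of_nodup n1 n2).mpr hmem)

-- ===== VERDICT (by name: the statement is the Claim_ definition above) =====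
theorem numbers_gen_spec : Claim_equal_numbers_gen := by
  intro start stop _hdom hpre
  unfold Spec_numbers_gen
  have hB : numbers_gen_alt start stop
      = pvAltLoop start stop (stop.toNat + 1) ((pvOddList 0).filter (fun n => n < stop)) := rfl
  rw [pvA_eq_filter start stop hpre, hB]
  apply pvSorted_ext
  · exact List.Pairwise.filter _ (PySem.List.pairwise_lt_pyRange_one start stop)
  · exact pvAlt_pairwise start stop (stop.toNat + 1) 0 (pvFuel_ok stop)
  · intro a
    rw [List.mem_filter, PySem.List.mem_pyRange_one,
      pvAlt_mem start stop (stop.toNat + 1) 0 (pvFuel_ok stop) a]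
    constructor
    · rintro ⟨⟨h1, h2⟩, h3⟩
      refine ⟨h1, h2, ?_, h3⟩
      -- a = 0 is impossible: pvOddDigits 0 = false; a < 0 is outside Pre_'s reachable members
      rcases hpre with hp | hp
      · have ha0 : 0 ≤ a := le_trans hp h1
        rcases eq_or_lt_of_le ha0 with rfl | hgt
        · simp [pvOddDigits] at h3
        · omega
      · omega
    · rintro ⟨h1, h2, h3, h4⟩
      exact ⟨⟨h1, h2⟩, h4⟩
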